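-- pv_equiv track=rewrite | github.com/AndySiul26/arv_reminder | conversations.py | _parsear_intervalo_raw
-- ===== SOURCE A (Python) =====
-- def _parsear_intervalo_raw(texto):
--     """Parsea un intervalo de texto como '2h', '1:d', '30x'. Retorna (num, simbolo) o None."""
--     texto = texto.strip().lower()
--     unidades = ["s", "x", "h", "d", "w", "m", "a"]
--
--     # Formato con ":"
--     if ":" in texto:
--         partes = texto.split(":")
--         if len(partes) == 2 and partes[0].isdigit() and partes[1] in unidades:
--             return int(partes[0]), partes[1]
--     else:
--         # Formato sin ":": buscar unidad al final
--         for i, char in enumerate(reversed(texto)):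
--             if char in unidades:
--                 num = texto[:-i-1]
--                 if num.isdigit():
--                     return int(num), char
--                 break
--     return None
-- ===== SOURCE B (Python) =====
-- def _parsear_intervalo_raw(texto):
--     """Parse '2h', '1:d', '30x' into (num, simbolo); None if the text is not number+unit."""
--     texto = texto.strip().lower()
--     unidades = ("s", "x", "h", "d", "w", "m", "a")
--     if ":" in texto:
--         num, _, unidad = texto.partition(":")
--         if num.isdigit() and unidad in unidades:
--             return int(num), unidad
--         return None
--     if texto and texto[-1] in unidades and texto[:-1].isdigit():
--         return int(texto[:-1]), texto[-1]
--     return None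
-- ===== Notes on version B (the rewrite author's own statement) =====
-- stated objective: simpler
-- what changed: Replaces A's per-character reversed enumerate scan (with negative-index slicing) by str.partition for the colon form and a direct last-char + digit-prefix check for the plain form; B deliberately rejects trailing garbage after the unit, stated as an intended difference.
-- intended difference: On colon-free inputs whose stripped/lowered form is digits, then one unit character, then a non-empty tail with no unit character and no colon (e.g. '2x3', '2h!'), A silently ignores the trailing garbage and returns (digits, unit) while B returns None; rejecting unparsed trailing characters is the intended behaviour of a parser. — e.g. on _parsear_intervalo_raw("2x3"): A returns some (2, "x"), B returns none
import Mathlib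
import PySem

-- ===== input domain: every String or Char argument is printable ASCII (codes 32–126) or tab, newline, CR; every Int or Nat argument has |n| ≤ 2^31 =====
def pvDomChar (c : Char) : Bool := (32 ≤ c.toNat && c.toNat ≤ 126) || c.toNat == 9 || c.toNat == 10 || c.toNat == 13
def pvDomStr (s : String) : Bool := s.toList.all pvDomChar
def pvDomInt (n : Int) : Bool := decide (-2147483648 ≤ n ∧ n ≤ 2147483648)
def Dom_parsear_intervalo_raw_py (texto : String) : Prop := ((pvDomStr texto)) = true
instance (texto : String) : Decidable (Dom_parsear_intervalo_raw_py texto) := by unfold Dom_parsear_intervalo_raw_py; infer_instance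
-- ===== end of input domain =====

-- B replaces A's reversed enumerate scan with str.partition for the colon form and a direct
-- last-char + digit-prefix check for the plain form; B rejects trailing garbage after the unit
-- (stated below as an intended difference D_).

-- int(s) for base 10, ported by hand as an exact transcription of Python's int():
-- optional surrounding whitespace, optional sign, ASCII digits with single '_' between digits;
-- none = ValueError.  (Hand-ported rather than taken from the prelude so that the tightness
-- proof below can reason about parse success by induction on this definition.)
def pvIntGo : List Char → Bool → Nat → Option Nat
  | [], afterDigit, acc => if afterDigit = true then some acc else none
  | c :: rest, afterDigit, acc =>
    if c.isDigit = true then pvIntGo rest true (acc * 10 + (c.toNat - '0'.toNat))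
    else
      if c = '_' ∧ afterDigit = true then
        match rest with
        | d :: _ => if d.isDigit = true then pvIntGo rest false acc else none
        | [] => none
      else none

def pvIntDigitsVal? (x : List Char) : Option Nat :=
  match x with
  | [] => none
  | cs => pvIntGo cs false 0

def pvIntOfChars? (s : List Char) : Option Int :=
  have cs := (List.dropWhile PySem.Int.isIntSpace (List.dropWhile PySem.Int.isIntSpace s).reverse).reverse
  match cs with
  | '-' :: ds => Option.map (fun n => -n) ((pvIntDigitsVal? ds).bind fun a => some (a : Int))
  | '+' :: ds => Option.map (fun n => n) ((pvIntDigitsVal? ds).bind fun a => some (a : Int))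
  | ds => Option.map (fun n => n) ((pvIntDigitsVal? ds).bind fun a => some (a : Int))

-- ===== PORT A =====
-- unidades = ["s", "x", "h", "d", "w", "m", "a"]  (list of 1-char strings, kept as List (List Char))
def pvUnidadesA : List (List Char) := [['s'], ['x'], ['h'], ['d'], ['w'], ['m'], ['a']]

-- for i, char in enumerate(reversed(texto)): …  (i is the running index, the list is reversed(texto))
def pvLoopA (t : List Char) : Nat → List Char → Option (Int × String)
  | _, [] => none
  | i, c :: rest =>
    if pvUnidadesA.contains [c] then
      -- num = texto[:-i-1]
      (let num := PySem.Chars.slice t none (some (-(i : Int) - 1));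
       if PySem.Chars.strIsdigit num then
         match pvIntOfChars? num with
         | some n => some (n, String.mk [c])
         | none => none
       else none)   -- break → return None
    else pvLoopA t (i + 1) rest

-- body of A after `texto = texto.strip().lower()`
def pvACore (t : List Char) : Option (Int × String) :=
  if PySem.Chars.isIn [':'] t then
    match PySem.Chars.splitOn t [':'] with
    | [p0, p1] =>
      if PySem.Chars.strIsdigit p0 && pvUnidadesA.contains p1 then
        match pvIntOfChars? p0 with
        | some n => some (n, String.mk p1)
        | none => none
      else none
    | _ => none
  else pvLoopA t 0 t.reverse

def parsear_intervalo_raw_py (texto : String) : Option (Int × String) :=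
  pvACore (PySem.Chars.lower (PySem.Chars.strip texto.toList))

-- ===== PORT B =====
-- unidades = ("s", "x", "h", "d", "w", "m", "a")
def pvUnidadesB : List (List Char) := [['s'], ['x'], ['h'], ['d'], ['w'], ['m'], ['a']]

-- num, _, unidad = texto.partition(":")
def pvPartitionColon (t : List Char) : List Char × List Char × List Char :=
  match t.dropWhile (fun c => !(c == ':')) with
  | [] => (t, [], [])
  | _ :: tail => (t.takeWhile (fun c => !(c == ':')), [':'], tail)

-- body of B after `texto = texto.strip().lower()`
def pvAltCore (t : List Char) : Option (Int × String) :=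
  if PySem.Chars.isIn [':'] t then
    match pvPartitionColon t with
    | (num, _, unidad) =>
      if PySem.Chars.strIsdigit num && pvUnidadesB.contains unidad then
        match pvIntOfChars? num with
        | some n => some (n, String.mk unidad)
        | none => none
      else none
  else if t ≠ [] then
    match PySem.List.pyGet? t (-1) with
    | some last =>
      if pvUnidadesB.contains [last] && PySem.Chars.strIsdigit (PySem.List.slice t none (some (-1))) then
        match pvIntOfChars? (PySem.List.slice t none (some (-1))) with
        | some n => some (n, String.mk [last])
        | none => none
      else none
    | none => none   -- unreachable: t ≠ []
  else none

def parsear_intervalo_raw_py_alt (texto : String) : Option (Int × String) :=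
  pvAltCore (PySem.Chars.lower (PySem.Chars.strip texto.toList))

-- ===== PRECONDITION & SPEC =====
-- On colon-free inputs whose stripped/lowered form is digits, then one unit character, then a
-- non-empty tail containing no unit character and no colon (e.g. '2x3', '2h!'), A silently ignores
-- the trailing garbage and returns (digits, unit), while B returns None; rejecting unparsed
-- trailing characters is the intended behaviour of a parser.
def pvDUnit (c : Char) : Bool := ['s', 'x', 'h', 'd', 'w', 'm', 'a'].contains c

def D_parsear_intervalo_raw_py (texto : String) : Prop :=
  let normalizado := PySem.Chars.lower (PySem.Chars.strip texto.toList)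
  let resto := normalizado.dropWhile PySem.Chars.isdigit
  normalizado.takeWhile PySem.Chars.isdigit ≠ [] ∧
  2 ≤ resto.length ∧
  pvDUnit (resto.headD ':') = true ∧
  (resto.tail.all fun c => !pvDUnit c && !(c == ':')) = true
instance (texto : String) : Decidable (D_parsear_intervalo_raw_py texto) := by
  unfold D_parsear_intervalo_raw_py; infer_instance

def Spec_parsear_intervalo_raw_py (texto : String) (out : Option (Int × String)) : Prop := ¬ D_parsear_intervalo_raw_py texto → out = parsear_intervalo_raw_py_alt texto
instance (texto : String) (out : Option (Int × String)) : Decidable (Spec_parsear_intervalo_raw_py texto out) := by unfold Spec_parsear_intervalo_raw_py; infer_instance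

def pvDiffWitness_parsear_intervalo_raw_py : String := "2x3"
def pvDiffWitnessOut_parsear_intervalo_raw_py : (Option (Int × String)) × (Option (Int × String)) := (some (2, "x"), none)

-- ===== CLAIM (what is proved, stated in full; the proofs are below) =====
def Claim_unchanged_parsear_intervalo_raw_py : Prop := ∀ (texto : String), Dom_parsear_intervalo_raw_py texto → Spec_parsear_intervalo_raw_py texto (parsear_intervalo_raw_py texto)
def Claim_exact_parsear_intervalo_raw_py : Prop := ∀ (texto : String), Dom_parsear_intervalo_raw_py texto → D_parsear_intervalo_raw_py texto → parsear_intervalo_raw_py texto ≠ parsear_intervalo_raw_py_alt texto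
def Claim_changed_parsear_intervalo_raw_py : Prop := Dom_parsear_intervalo_raw_py (pvDiffWitness_parsear_intervalo_raw_py) ∧ D_parsear_intervalo_raw_py (pvDiffWitness_parsear_intervalo_raw_py) ∧ parsear_intervalo_raw_py (pvDiffWitness_parsear_intervalo_raw_py) = pvDiffWitnessOut_parsear_intervalo_raw_py.1 ∧ parsear_intervalo_raw_py_alt (pvDiffWitness_parsear_intervalo_raw_py) = pvDiffWitnessOut_parsear_intervalo_raw_py.2 ∧ pvDiffWitnessOut_parsear_intervalo_raw_py.1 ≠ pvDiffWitnessOut_parsear_intervalo_raw_py.2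

-- ===== LEMMAS AND PROOFS =====

-- the change region, restated on the already-normalised character list (proof helper)
def pvDcore (t : List Char) : Prop :=
  t.takeWhile PySem.Chars.isdigit ≠ [] ∧
  2 ≤ (t.dropWhile PySem.Chars.isdigit).length ∧
  pvDUnit ((t.dropWhile PySem.Chars.isdigit).headD ':') = true ∧
  ((t.dropWhile PySem.Chars.isdigit).tail.all fun c => !pvDUnit c && !(c == ':')) = true

theorem pv_D_eq_core (texto : String) :
    D_parsear_intervalo_raw_py texto ↔ pvDcore (PySem.Chars.lower (PySem.Chars.strip texto.toList)) :=
  Iff.rfl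

theorem pv_contD (c : Char) : pvUnidadesA.contains [c] = pvDUnit c := by
  simp [pvUnidadesA, pvDUnit]

theorem pv_unit_not_digit {c : Char} (h : pvUnidadesA.contains [c] = true) :
    PySem.Chars.isdigit c = false := by
  simp [pvUnidadesA] at h
  rcases h with h | h | h | h | h | h | h <;> subst h <;> decide

theorem pv_contains_colon {p : List Char} (h : ':' ∈ p) : pvUnidadesB.contains p = false := by
  by_contra hc
  rw [Bool.not_eq_false] at hc
  simp [pvUnidadesB] at hc
  rcases hc with h' | h' | h' | h' | h' | h' | h' <;> subst h' <;> simp at h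

theorem pv_strIsdigit_eq (xs : List Char) :
    PySem.Chars.strIsdigit xs = (!xs.isEmpty && xs.all PySem.Chars.isdigit) := rfl

-- reference shape of Python's str.split(":")
def pvSplitSpec : List Char → List (List Char)
  | [] => [[]]
  | c :: r => if c = ':' then [] :: pvSplitSpec r else (pvSplitSpec r).modifyHead (c :: ·)

theorem pvSplitSpec_ne_nil (l : List Char) : pvSplitSpec l ≠ [] := by
  induction l with
  | nil => simp [pvSplitSpec]
  | cons c r ih =>
    simp only [pvSplitSpec]
    split
    · simp
    · simpa [List.modifyHead_eq_nil_iff] using ih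

theorem pv_modifyHead_nil_append (l : List (List Char)) :
    List.modifyHead (fun x => [] ++ x) l = l := by
  cases l <;> simp

theorem pv_modifyHead_fun_id (l : List (List Char)) :
    List.modifyHead (fun x => x) l = l := by
  cases l <;> simp

theorem pv_go (l : List Char) : ∀ (fuel : Nat) (cur : List Char) (acc : List (List Char)),
    l.length ≤ fuel →
    PySem.Chars.splitOn.go [':'] fuel l cur acc
      = acc.reverse ++ List.modifyHead (cur.reverse ++ ·) (pvSplitSpec l) := by
  induction l with
  | nil =>
    intro fuel cur acc _
    cases fuel <;> simp [PySem.Chars.splitOn.go, pvSplitSpec]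
  | cons c rest ih =>
    intro fuel cur acc h
    cases fuel with
    | zero => simp at h
    | succ f =>
      by_cases hc : c = ':'
      · subst hc
        have hpre : List.isPrefixOf [':'] (':' :: rest) = true := by
          simp [List.isPrefixOf]
        simp only [PySem.Chars.splitOn.go, hpre, if_pos rfl, if_true]
        rw [show List.drop [':'].length (':' :: rest) = rest from rfl]
        rw [ih f [] ((cur.reverse) :: acc) (by simpa using Nat.lt_succ_iff.mp (Nat.lt_of_lt_of_le (Nat.lt_succ_of_le (Nat.le_refl _)) h))]
        simp [pvSplitSpec, pv_modifyHead_nil_append, pv_modifyHead_fun_id]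
      · have hpre : List.isPrefixOf [':'] (c :: rest) = false := by
          simp [List.isPrefixOf]; exact fun hh => hc hh.symm
        simp only [PySem.Chars.splitOn.go, hpre]
        rw [ih f (c :: cur) acc (by simp at h; omega)]
        cases hsp : pvSplitSpec rest with
        | nil => exact absurd hsp (pvSplitSpec_ne_nil rest)
        | cons a b => simp [pvSplitSpec, if_neg hc, hsp]

theorem pv_splitOn_colon (t : List Char) : PySem.Chars.splitOn t [':'] = pvSplitSpec t := by
  unfold PySem.Chars.splitOn
  rw [pv_go t (t.length + 1) [] [] (by omega)]
  simp [pv_modifyHead_nil_append, pv_modifyHead_fun_id]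

theorem pvSplitSpec_no_colon {l : List Char} (h : ':' ∉ l) : pvSplitSpec l = [l] := by
  induction l with
  | nil => rfl
  | cons c r ih =>
    simp only [List.mem_cons, not_or] at h
    simp [pvSplitSpec, Ne.symm h.1, ih h.2]

theorem pvSplitSpec_colon_split {t : List Char} (h : ':' ∈ t) :
    pvSplitSpec t = t.takeWhile (fun c => !(c == ':')) ::
      pvSplitSpec ((t.dropWhile (fun c => !(c == ':'))).tail) := by
  induction t with
  | nil => cases h
  | cons c r ih =>
    by_cases hc : c = ':'
    · subst hc; simp [pvSplitSpec, List.takeWhile_cons, List.dropWhile_cons]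
    · have hr : ':' ∈ r := (List.mem_cons.mp h).resolve_left (fun h' => hc h'.symm)
      have hne : (c == ':') = false := by simp [hc]
      simp only [pvSplitSpec, if_neg hc, ih hr, List.takeWhile_cons, List.dropWhile_cons, hne]
      simp

-- texto[:-k]  (1 ≤ k ≤ len)
theorem pv_slice_negEnd (t : List Char) (k : Nat) (hk1 : 1 ≤ k) (hk2 : k ≤ t.length) :
    PySem.List.slice t none (some (-(k : Int))) = t.take (t.length - k) := by
  have h1 : -(k : Int) < 0 := by omega
  have h2 : ¬ ((t.length : Int) + -(k : Int) < 0) := by omega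
  have h3 : ((t.length : Int) + -(k : Int)).toNat = t.length - k := by omega
  have h4 : 0 < k := hk1
  simp [PySem.List.slice, PySem.List.clampIdx, h1, h2, h3, h4]

-- reference shape of A's reversed scan
def pvScanSpec : List Char → Option (Int × String)
  | [] => none
  | c :: rest =>
    if pvUnidadesA.contains [c] then
      (if PySem.Chars.strIsdigit rest.reverse then
         match pvIntOfChars? rest.reverse with
         | some n => some (n, String.mk [c])
         | none => none
       else none)
    else pvScanSpec rest

theorem pvLoopA_eq (l : List Char) : ∀ (pre t : List Char), t.reverse = pre ++ l →
    pvLoopA t pre.length l = pvScanSpec l := by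
  induction l with
  | nil => intro pre t _; rfl
  | cons c rest ih =>
    intro pre t h
    have ht : t = (rest.reverse ++ [c]) ++ pre.reverse := by
      have := congrArg List.reverse h
      simpa using this
    by_cases hc : pvUnidadesA.contains [c] = true
    · have hlen : t.length = rest.length + 1 + pre.length := by
        rw [ht]; simp; omega
      have harg : -(pre.length : Int) - 1 = -(((pre.length + 1 : Nat)) : Int) := by push_cast; ring
      have hslice : PySem.List.slice t none (some (-(pre.length : Int) - 1))
          = rest.reverse := by
        rw [harg, pv_slice_negEnd t (pre.length + 1) (by omega) (by omega)]
        have : t.length - (pre.length + 1) = rest.reverse.length := by simp; omega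
        rw [this, ht, List.append_assoc, List.take_left]
      simp only [pvLoopA, pvScanSpec, hc, if_true]
      rw [show PySem.Chars.slice t none (some (-(pre.length : Int) - 1))
            = PySem.List.slice t none (some (-(pre.length : Int) - 1)) from rfl]
      rw [hslice]
    · simp only [pvLoopA, pvScanSpec, hc, if_false, Bool.false_eq_true]
      have := ih (pre ++ [c]) t (by rw [h]; simp)
      simpa using this

theorem pv_scan_skip {a : List Char} (l : List Char)
    (h : ∀ x ∈ a, pvUnidadesA.contains [x] = false) :
    pvScanSpec (a ++ l) = pvScanSpec l := by
  induction a with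
  | nil => rfl
  | cons c r ih =>
    have hc := h c (by simp)
    simp only [List.cons_append, pvScanSpec, hc, Bool.false_eq_true, if_false]
    exact ih (fun x hx => h x (by simp [hx]))

theorem pv_pyGet_last (l : List Char) (x : Char) :
    PySem.List.pyGet? (l ++ [x]) (-1) = some x := by
  simp [PySem.List.pyGet?, PySem.List.pyIdx?]

theorem pv_isIn_singleton (c : Char) (s : List Char) : PySem.Chars.isIn [c] s = s.contains c := by
  rw [Bool.eq_iff_iff, PySem.Chars.isIn_iff_infix, List.singleton_infix_iff, List.contains_iff_mem]

theorem pv_dropWhile_head {p : Char → Bool} {l : List Char} {u : Char} {cola : List Char}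
    (h : l.dropWhile p = u :: cola) : p u = false := by
  induction l with
  | nil => simp at h
  | cons c r ih =>
    rw [List.dropWhile_cons] at h
    by_cases hc : p c
    · simp [hc] at h; exact ih h
    · simp [hc] at h; rw [← h.1]; exact Bool.eq_false_iff.mpr hc

theorem pv_take_drop (d : List Char) (u : Char) (g : List Char)
    (hd : ∀ x ∈ d, PySem.Chars.isdigit x = true) (hu : PySem.Chars.isdigit u = false) :
    (d ++ u :: g).takeWhile PySem.Chars.isdigit = d ∧
    (d ++ u :: g).dropWhile PySem.Chars.isdigit = u :: g := by
  induction d with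
  | nil => simp [List.takeWhile_cons, List.dropWhile_cons, hu]
  | cons c r ih =>
    have hc := hd c (by simp)
    have := ih (fun x hx => hd x (by simp [hx]))
    simp [List.takeWhile_cons, List.dropWhile_cons, hc, this.1, this.2]

-- no-colon branch: A's reversed scan agrees with B's last-char check outside pvDcore
theorem pv_noColon (t : List Char) (hcol : ':' ∉ t) (hD : ¬ pvDcore t) :
    pvACore t = pvAltCore t := by
  have hin : PySem.Chars.isIn [':'] t = false := by
    rw [pv_isIn_singleton]
    simpa using hcol
  unfold pvACore pvAltCore
  simp only [hin, Bool.false_eq_true, if_false]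
  have hA : pvLoopA t 0 t.reverse = pvScanSpec t.reverse := pvLoopA_eq _ [] t (by simp)
  rw [hA]
  have ha : ∀ x ∈ t.reverse.takeWhile (fun c => !(pvUnidadesA.contains [c])),
      pvUnidadesA.contains [x] = false := by
    intro x hx
    have := List.mem_takeWhile_imp hx
    simpa using this
  have hscan : pvScanSpec t.reverse
      = pvScanSpec (t.reverse.dropWhile (fun c => !(pvUnidadesA.contains [c]))) := by
    conv_lhs => rw [← List.takeWhile_append_dropWhile
      (p := fun c => !(pvUnidadesA.contains [c])) (l := t.reverse)]
    exact pv_scan_skip _ ha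
  rw [hscan]
  cases hb : t.reverse.dropWhile (fun c => !(pvUnidadesA.contains [c])) with
  | nil =>
    have hall : ∀ x ∈ t.reverse, pvUnidadesA.contains [x] = false := by
      have h' := List.dropWhile_eq_nil_iff.mp hb
      intro x hx
      simpa using h' x hx
    cases hr : t.reverse with
    | nil =>
      have ht : t = [] := by simpa using congrArg List.reverse hr
      subst ht; simp [pvScanSpec]
    | cons c rest =>
      have ht : t = rest.reverse ++ [c] := by
        have := congrArg List.reverse hr; simpa using this
      have hc : pvUnidadesB.contains [c] = false := hall c (by rw [hr]; simp)
      rw [ht, if_pos (by simp), pv_pyGet_last]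
      simp [pvScanSpec, show [c] ∉ pvUnidadesB from by simpa using hc]
  | cons u pr =>
    have hu : pvUnidadesA.contains [u] = true := by
      have := pv_dropWhile_head hb
      simpa using this
    have hub : pvUnidadesB.contains [u] = true := hu
    have ht : t = pr.reverse ++ u :: (t.reverse.takeWhile (fun c => !(pvUnidadesA.contains [c]))).reverse := by
      have h0 : t.reverse = t.reverse.takeWhile (fun c => !(pvUnidadesA.contains [c])) ++ (u :: pr) := by
        rw [← hb]; exact (List.takeWhile_append_dropWhile).symm
      have := congrArg List.reverse h0
      simpa using this
    set a := t.reverse.takeWhile (fun c => !(pvUnidadesA.contains [c])) with hadef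
    cases haa : a with
    | nil =>
      -- t = pr.reverse ++ [u] : exactly B's accepted shape
      rw [haa] at ht; simp only [List.reverse_nil, List.append_nil] at ht
      rw [ht, if_pos (by simp), pv_pyGet_last, PySem.List.slice_to_neg_one, List.dropLast_concat]
      cases hsd : PySem.Chars.strIsdigit pr.reverse <;>
        simp [pvScanSpec, hsd, show [u] ∈ pvUnidadesA from by simpa using hu,
              show [u] ∈ pvUnidadesB from by simpa using hub]
    | cons c a' =>
      -- trailing garbage after the last unit: B rejects; ¬pvDcore forces A to reject too
      have hsd : PySem.Chars.strIsdigit pr.reverse = false := by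
        by_contra hsd'
        rw [Bool.not_eq_false] at hsd'
        rw [pv_strIsdigit_eq] at hsd'
        have hne : pr.reverse ≠ [] := by
          intro hh; rw [hh] at hsd'; simp at hsd'
        have hdig : ∀ x ∈ pr.reverse, PySem.Chars.isdigit x = true := by
          intro x hx
          have := (Bool.and_eq_true _ _).mp hsd'
          exact List.all_eq_true.mp this.2 x hx
        have hund : PySem.Chars.isdigit u = false := pv_unit_not_digit hu
        have htd := pv_take_drop pr.reverse u a.reverse hdig hund
        apply hD
        refine ⟨?_, ?_, ?_, ?_⟩
        · rw [ht, htd.1]; exact hne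
        · rw [ht, htd.2]; simp [haa]
        · rw [ht, htd.2]
          simp only [List.headD_cons]
          rw [← pv_contD]; exact hu
        · rw [ht, htd.2]
          simp only [List.tail_cons]
          rw [List.all_eq_true]
          intro x hx
          have hxa : x ∈ a := List.mem_reverse.mp hx
          have hxn : pvUnidadesA.contains [x] = false := ha x hxa
          have hxt : x ∈ t := by
            rw [ht]
            simp only [List.mem_append, List.mem_cons, List.mem_reverse]
            exact Or.inr (Or.inr hxa)
          have hxc : x ≠ ':' := by
            intro hh; subst hh; exact hcol hxt
          simp only [pvUnidadesA, List.contains_eq_mem, List.mem_cons] at hxn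
          simp only [pvDUnit, List.contains_eq_mem, List.mem_cons] at *
          simp [hxc]
          simpa using hxn
      have ht2 : t = (pr.reverse ++ u :: a'.reverse) ++ [c] := by
        rw [ht, haa]; simp
      have hcnb : pvUnidadesB.contains [c] = false := by
        show pvUnidadesA.contains [c] = false
        exact ha c (by rw [haa]; simp)
      rw [ht2, if_pos (by simp), pv_pyGet_last]
      simp [pvScanSpec, hsd, show [u] ∈ pvUnidadesA from by simpa using hu,
            show [c] ∉ pvUnidadesB from by simpa using hcnb]

-- colon branch: unconditional agreement
theorem pv_colon (t : List Char) (hcol : ':' ∈ t) :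
    pvACore t = pvAltCore t := by
  have hin : PySem.Chars.isIn [':'] t = true := by
    rw [pv_isIn_singleton]
    simpa using hcol
  have hdw : t.dropWhile (fun c => !(c == ':')) ≠ [] := by
    intro h
    have h' := List.dropWhile_eq_nil_iff.mp h
    have := h' ':' hcol
    simp at this
  unfold pvACore pvAltCore
  simp only [hin, if_true]
  rw [pv_splitOn_colon, pvSplitSpec_colon_split hcol]
  unfold pvPartitionColon
  cases hdc : t.dropWhile (fun c => !(c == ':')) with
  | nil => exact absurd hdc hdw
  | cons hd tail =>
    simp only [List.tail_cons]
    by_cases hc2 : ':' ∈ tail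
    · rw [pvSplitSpec_colon_split hc2]
      cases hss : pvSplitSpec ((tail.dropWhile (fun c => !(c == ':'))).tail) with
      | nil => exact absurd hss (pvSplitSpec_ne_nil _)
      | cons z zs =>
        have hcf : pvUnidadesB.contains tail = false := pv_contains_colon hc2
        simp [show tail ∉ pvUnidadesB from by simpa using hcf]
    · rw [pvSplitSpec_no_colon hc2]
      rfl

theorem pv_core_eq (t : List Char) (hD : ¬ pvDcore t) : pvACore t = pvAltCore t := by
  by_cases hcol : ':' ∈ t
  · exact pv_colon t hcol
  · exact pv_noColon t hcol hD

-- parse success of int() on non-empty ASCII digit strings (for the tightness theorem)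
theorem pv_isdigit_isDigit {c : Char} (h : PySem.Chars.isdigit c = true) : c.isDigit = true := by
  simp only [PySem.Chars.isdigit, Bool.and_eq_true, decide_eq_true_eq] at h
  simp only [Char.isDigit, Bool.and_eq_true, decide_eq_true_eq]
  exact ⟨h.1, h.2⟩

theorem pv_digit_not_space {c : Char} (h : PySem.Chars.isdigit c = true) :
    PySem.Int.isIntSpace c = false := by
  simp only [PySem.Chars.isdigit, Bool.and_eq_true, decide_eq_true_eq] at h
  have h0 : ('0' : Char) ≤ c := h.1
  simp only [PySem.Int.isIntSpace, Bool.or_eq_false_iff, decide_eq_false_iff_not]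
  refine ⟨⟨⟨⟨⟨?_, ?_⟩, ?_⟩, ?_⟩, ?_⟩, ?_⟩ <;>
    · intro hh; subst hh; exact absurd h0 (by decide)

theorem pv_dropWhile_all_false {p : Char → Bool} {l : List Char} (h : ∀ x ∈ l, p x = false) :
    l.dropWhile p = l := by
  cases l with
  | nil => rfl
  | cons c r => rw [List.dropWhile_cons, h c (by simp)]; simp

theorem pv_intGo_digits (ds : List Char) (h : ∀ c ∈ ds, c.isDigit = true) :
    ∀ acc, ∃ m, pvIntGo ds true acc = some m := by
  induction ds with
  | nil => intro acc; exact ⟨acc, rfl⟩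
  | cons d rest ih =>
    intro acc
    have hd := h d (by simp)
    simp only [pvIntGo, hd, if_true]
    exact ih (fun c hc => h c (by simp [hc])) _

theorem pv_ofChars_digits (ds : List Char) (hne : ds ≠ [])
    (h : ∀ c ∈ ds, PySem.Chars.isdigit c = true) :
    ∃ n, pvIntOfChars? ds = some n := by
  have hns : ∀ x ∈ ds, PySem.Int.isIntSpace x = false := fun x hx => pv_digit_not_space (h x hx)
  have h2 : List.dropWhile PySem.Int.isIntSpace ds.reverse = ds.reverse :=
    pv_dropWhile_all_false (fun x hx => hns x (List.mem_reverse.mp hx))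
  have h1 : List.dropWhile PySem.Int.isIntSpace ds = ds := pv_dropWhile_all_false hns
  unfold pvIntOfChars?
  rw [h1, h2, List.reverse_reverse]
  cases ds with
  | nil => exact absurd rfl hne
  | cons d rest =>
    have hdd : d.isDigit = true := pv_isdigit_isDigit (h d (by simp))
    have hd1 : d ≠ '-' := by intro hh; subst hh; simp at hdd
    have hd2 : d ≠ '+' := by intro hh; subst hh; simp at hdd
    have hrest : ∀ c ∈ rest, c.isDigit = true :=
      fun c hc => pv_isdigit_isDigit (h c (by simp [hc]))
    show ∃ n,
      (match d :: rest with
        | '-' :: ds => Option.map (fun n => -n) ((pvIntDigitsVal? ds).bind fun a => some ((a : Nat) : Int))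
        | '+' :: ds => Option.map (fun n => n) ((pvIntDigitsVal? ds).bind fun a => some ((a : Nat) : Int))
        | ds => Option.map (fun n => n) ((pvIntDigitsVal? ds).bind fun a => some ((a : Nat) : Int))) = some n
    split
    · rename_i heq
      rw [List.cons.injEq] at heq
      exact absurd heq.1 hd1
    · rename_i heq
      rw [List.cons.injEq] at heq
      exact absurd heq.1 hd2
    · rw [show pvIntDigitsVal? (d :: rest) = pvIntGo (d :: rest) false 0 from rfl]
      simp only [pvIntGo, hdd, if_true]
      obtain ⟨m, hm⟩ := pv_intGo_digits rest hrest (0 * 10 + (d.toNat - '0'.toNat))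
      exact ⟨m, by rw [hm]; rfl⟩

-- ===== VERDICT (by name: the statement is the Claim_ definition above) =====
theorem parsear_intervalo_raw_py_spec : Claim_unchanged_parsear_intervalo_raw_py := by
  intro texto _ hD
  unfold parsear_intervalo_raw_py parsear_intervalo_raw_py_alt
  exact pv_core_eq _ (fun hc => hD ((pv_D_eq_core texto).mpr hc))

set_option maxRecDepth 4000 in
theorem parsear_intervalo_raw_py_changed : Claim_changed_parsear_intervalo_raw_py := by
  unfold Claim_changed_parsear_intervalo_raw_py
  refine ⟨by decide, by decide, by rfl, by rfl, by decide⟩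

theorem parsear_intervalo_raw_py_tight : Claim_exact_parsear_intervalo_raw_py := by
  intro texto _ hd
  replace hd := (pv_D_eq_core texto).mp hd
  unfold parsear_intervalo_raw_py parsear_intervalo_raw_py_alt
  set t := PySem.Chars.lower (PySem.Chars.strip texto.toList) with htdef
  obtain ⟨h1, h2, h3, h4⟩ := hd
  cases hr : t.dropWhile PySem.Chars.isdigit with
  | nil => rw [hr] at h2; simp at h2
  | cons u g =>
    rw [hr] at h2 h3 h4
    simp only [List.headD_cons] at h3
    simp only [List.tail_cons] at h4
    have hglen : g ≠ [] := by
      intro hh; rw [hh] at h2; simp at h2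
    have hu : pvUnidadesA.contains [u] = true := by rw [pv_contD]; exact h3
    have ht : t = t.takeWhile PySem.Chars.isdigit ++ u :: g := by
      rw [← hr]; exact (List.takeWhile_append_dropWhile).symm
    set d := t.takeWhile PySem.Chars.isdigit with hddef
    have hdig : ∀ x ∈ d, PySem.Chars.isdigit x = true :=
      fun x hx => List.mem_takeWhile_imp hx
    have hg : ∀ c ∈ g, pvDUnit c = false ∧ (c == ':') = false := by
      intro c hc
      have := List.all_eq_true.mp h4 c hc
      simp only [Bool.and_eq_true, Bool.not_eq_true'] at this
      exact this
    have hcol : ':' ∉ t := by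
      rw [ht]
      intro hmem
      rcases List.mem_append.mp hmem with hmem | hmem
      · have := hdig ':' hmem; simp [PySem.Chars.isdigit] at this
      · rcases List.mem_cons.mp hmem with hh | hh
        · rw [← hh] at h3; simp [pvDUnit] at h3
        · have := (hg ':' hh).2; simp at this
    -- A returns a value
    have hin : PySem.Chars.isIn [':'] t = false := by
      rw [pv_isIn_singleton]; simpa using hcol
    have htrev : t.reverse = g.reverse ++ u :: d.reverse := by
      rw [ht]; simp
    have hA0 : pvLoopA t 0 t.reverse = pvScanSpec t.reverse := pvLoopA_eq _ [] t (by simp)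
    have hAscan : pvLoopA t 0 t.reverse = pvScanSpec (u :: d.reverse) := by
      rw [hA0, htrev]
      exact pv_scan_skip _ (fun x hx => by
        rw [pv_contD]; exact (hg x (List.mem_reverse.mp hx)).1)
    have hsd : PySem.Chars.strIsdigit d = true := by
      rw [pv_strIsdigit_eq]
      simp only [Bool.and_eq_true, List.all_eq_true]
      exact ⟨by simp [List.isEmpty_eq_false_iff, h1], hdig⟩
    obtain ⟨n, hn⟩ := pv_ofChars_digits d h1 hdig
    have hA : pvACore t = some (n, String.mk [u]) := by
      unfold pvACore
      simp only [hin, Bool.false_eq_true, if_false]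
      rw [hAscan]
      simp [pvScanSpec, show [u] ∈ pvUnidadesA from by simpa using hu, hsd, hn]
    -- B returns none
    have hglast := List.dropLast_concat_getLast hglen
    have ht2 : t = (d ++ u :: g.dropLast) ++ [g.getLast hglen] := by
      conv_lhs => rw [ht, ← hglast]
      simp
    have hlastg : g.getLast hglen ∈ g := List.getLast_mem hglen
    have hlast : pvUnidadesB.contains [g.getLast hglen] = false := by
      show pvUnidadesA.contains [g.getLast hglen] = false
      rw [pv_contD]; exact (hg _ hlastg).1
    have hB : pvAltCore t = none := by
      unfold pvAltCore
      simp only [hin, Bool.false_eq_true, if_false]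
      rw [ht2, if_pos (by simp), pv_pyGet_last]
      simp [show [g.getLast hglen] ∉ pvUnidadesB from by simpa using hlast]
    rw [hA, hB]
    simp
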